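-- pv_equiv track=rewrite | github.com/HoshiMeisa/LanQiao-Cup-2023 | 省赛解答/C.py | max_loose_subsequence_value
-- ===== SOURCE A (Python) =====
-- def max_loose_subsequence_value(s):
--     n = len(s)
--     dp = [0] * n    # 用于储当前位置 i 的最大松散子序列价值
--     max_value = 0   # 用于记录遍历过程中的最大松散子序列价值
--
--     for i in range(n):
--         value = ord(s[i]) - ord('a') + 1   # 计算价值
--         dp[i] = value
--         for j in range(i - 2, -1, -1):
--             dp[i] = max(dp[i], dp[j] + value)
--         max_value = max(max_value, dp[i])
--
--     return max_value
-- ===== SOURCE B (Python) =====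
-- def max_loose_subsequence_value(s):
--     # O(n) DP: a = max(0, best dp value among positions <= i-2), b = same for <= i-1.
--     a = b = ans = 0
--     for i in range(len(s)):
--         d = ord(s[i]) - ord('a') + 1 + a
--         ans = max(ans, d)
--         a, b = b, max(b, d)
--     return ans
-- ===== Notes on version B (the rewrite author's own statement) =====
-- stated objective: faster
-- what changed: Replaces A's inner backward rescan of dp[j] for all j <= i-2 (O(n^2)) by a single pass that maintains running prefix maxima of the dp values lagged by one and two positions (O(n)).
import Mathlib
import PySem

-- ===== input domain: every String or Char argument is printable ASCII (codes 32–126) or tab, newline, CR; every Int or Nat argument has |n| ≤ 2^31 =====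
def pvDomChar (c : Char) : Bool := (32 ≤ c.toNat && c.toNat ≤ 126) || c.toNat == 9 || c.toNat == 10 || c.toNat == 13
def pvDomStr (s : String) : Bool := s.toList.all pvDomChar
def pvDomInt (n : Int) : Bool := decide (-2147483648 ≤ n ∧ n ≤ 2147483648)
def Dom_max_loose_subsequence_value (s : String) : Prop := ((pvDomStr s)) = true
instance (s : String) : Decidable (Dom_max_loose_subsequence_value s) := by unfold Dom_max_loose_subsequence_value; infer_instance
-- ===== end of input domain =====

-- B replaces A's quadratic rescan of all dp[j] (j ≤ i-2) by a running prefix maximum lagged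
-- by two positions: one pass, O(n) instead of O(n^2) (objective: faster, asymptotic).

-- ===== PORT A =====
-- Literal transliteration of A: dp list of length n, outer loop over i, inner loop
-- j = i-2 down to 0 updating dp[i] in place, running max_value.
def max_loose_subsequence_value (s : String) : Int :=
  let cs := s.toList
  let n : Int := PySem.Str.len s
  let dp0 : List Int := List.replicate n.toNat 0
  let st :=
    (PySem.List.pyRange 0 n 1).foldl (fun (st : List Int × Int) i =>
      let dp := st.1
      let max_value := st.2
      let value : Int := ((PySem.List.pyGetD cs i ' ').toNat : Int) - 97 + 1
      let dp := dp.set i.toNat value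
      let dp :=
        (PySem.List.pyRange (i - 2) (-1) (-1)).foldl (fun dp j =>
          dp.set i.toNat (max (PySem.List.pyGetD dp i 0) (PySem.List.pyGetD dp j 0 + value))) dp
      (dp, max max_value (PySem.List.pyGetD dp i 0))) (dp0, 0)
  st.2

-- ===== PORT B =====
-- Literal transliteration of B: single pass with state (a, b, ans);
-- a = max(0, dp[..i-2]), b = max(0, dp[..i-1]) maintained on the fly.
def max_loose_subsequence_value_alt (s : String) : Int :=
  let cs := s.toList
  let st :=
    (PySem.List.pyRange 0 (PySem.Str.len s) 1).foldl (fun (st : Int × Int × Int) i =>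
      let a := st.1
      let b := st.2.1
      let ans := st.2.2
      let d : Int := ((PySem.List.pyGetD cs i ' ').toNat : Int) - 97 + 1 + a
      (b, max b d, max ans d)) (0, 0, 0)
  st.2.2

-- ===== PRECONDITION & SPEC =====
def Spec_max_loose_subsequence_value (s : String) (out : Int) : Prop := out = max_loose_subsequence_value_alt s
instance (s : String) (out : Int) : Decidable (Spec_max_loose_subsequence_value s out) := by unfold Spec_max_loose_subsequence_value; infer_instance

-- ===== CLAIM (what is proved, stated in full; the proofs are below) =====
def Claim_equal_max_loose_subsequence_value : Prop := ∀ (s : String), Dom_max_loose_subsequence_value s → Spec_max_loose_subsequence_value s (max_loose_subsequence_value s)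

-- ===== LEMMAS AND PROOFS =====

-- value of position k (0 for out-of-range, never used there)
def pvVal (cs : List Char) (k : ℕ) : Int := ((cs.getD k ' ').toNat : Int) - 97 + 1

-- Pf cs k = max(0, dp[0..k-1]) of A's dp recurrence
def pvPf (cs : List Char) : ℕ → Int
  | 0 => 0
  | 1 => max 0 (pvVal cs 0)
  | (k+2) => max (pvPf cs (k+1)) (pvVal cs (k+1) + pvPf cs k)

-- dp value at position k
def pvDv (cs : List Char) (k : ℕ) : Int := pvVal cs k + pvPf cs (k - 1)

-- Q cs k = max dp[0..k] (no floor at 0)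
def pvQ (cs : List Char) : ℕ → Int
  | 0 => pvDv cs 0
  | (k+1) => max (pvQ cs k) (pvDv cs (k+1))

lemma pvPf_succ (cs : List Char) (k : ℕ) : pvPf cs (k+1) = max (pvPf cs k) (pvDv cs k) := by
  cases k with
  | zero => simp [pvPf, pvDv, pvVal]
  | succ k => simp [pvPf, pvDv]

lemma pvPf_eq_maxQ (cs : List Char) (k : ℕ) : pvPf cs (k+1) = max 0 (pvQ cs k) := by
  induction k with
  | zero => simp [pvPf, pvQ, pvDv]
  | succ k ih => rw [pvPf_succ, ih, pvQ, max_assoc]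

-- inner loop of A: folding j = k .. 0 over the set/get step equals one set at position m
lemma inner_fold (cs : List Char) (v : Int) (m : ℕ) :
    ∀ (k : ℕ), k < m → ∀ (dp : List Int), m < dp.length →
      (∀ j : ℕ, j ≤ k → dp.getD j 0 = pvDv cs j) →
      (PySem.List.pyRange (k : Int) (-1) (-1)).foldl
        (fun dp j => dp.set m (max (PySem.List.pyGetD dp (m : Int) 0) (PySem.List.pyGetD dp j 0 + v))) dp
      = dp.set m (max (dp.getD m 0) (pvQ cs k + v)) := by
  intro k
  induction k with
  | zero =>
    intro hk dp hm hdp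
    rw [PySem.List.pyRange_neg_one_cons (by norm_num : (-1:Int) < ((0:ℕ):Int))]
    rw [PySem.List.pyRange_neg_one_eq_nil (by norm_num)]
    simp only [List.foldl_cons, List.foldl_nil]
    have h0 : PySem.List.pyGetD dp ((0:ℕ) : Int) 0 = dp.getD 0 0 := PySem.List.pyGetD_natCast dp 0 0
    have hm' : PySem.List.pyGetD dp ((m:ℕ) : Int) 0 = dp.getD m 0 := PySem.List.pyGetD_natCast dp m 0
    rw [h0, hm', hdp 0 (le_refl 0)]
    simp [pvQ]
  | succ k ih =>
    intro hk dp hm hdp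
    have hcons : PySem.List.pyRange ((k+1 : ℕ) : Int) (-1) (-1)
        = ((k+1 : ℕ) : Int) :: PySem.List.pyRange ((k : ℕ) : Int) (-1) (-1) := by
      have := PySem.List.pyRange_neg_one_cons (a := ((k+1:ℕ) : Int)) (b := -1) (by push_cast; omega)
      rw [this]; norm_num
    rw [hcons]
    simp only [List.foldl_cons]
    have hget1 : PySem.List.pyGetD dp ((k+1:ℕ) : Int) 0 = dp.getD (k+1) 0 := PySem.List.pyGetD_natCast dp (k+1) 0
    have hgetm : PySem.List.pyGetD dp ((m:ℕ) : Int) 0 = dp.getD m 0 := PySem.List.pyGetD_natCast dp m 0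
    rw [hget1, hgetm, hdp (k+1) (le_refl _)]
    set dp1 := dp.set m (max (dp.getD m 0) (pvDv cs (k+1) + v)) with hdp1
    have hlen1 : m < dp1.length := by simpa [hdp1] using hm
    have hkeep : ∀ j : ℕ, j ≤ k → dp1.getD j 0 = pvDv cs j := by
      intro j hj
      have hjm : j ≠ m := by omega
      rw [hdp1, List.getD, List.getElem?_set_ne (by omega)]
      exact hdp j (by omega)
    rw [ih (by omega) dp1 hlen1 hkeep]
    have hdm : dp1.getD m 0 = max (dp.getD m 0) (pvDv cs (k+1) + v) := by
      rw [hdp1, List.getD, List.getElem?_set_self, Option.getD_some]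
      · exact hm
    rw [hdp1, List.set_set, hdm, pvQ]
    congr 1
    have : max (pvQ cs k) (pvDv cs (k+1)) + v = max (pvQ cs k + v) (pvDv cs (k+1) + v) := by
      rcases le_total (pvQ cs k) (pvDv cs (k+1)) with h | h
      · rw [max_eq_right h, max_eq_right (by omega)]
      · rw [max_eq_left h, max_eq_left (by omega)]
    rw [this]
    rcases le_total (dp.getD m 0) (pvDv cs (k+1) + v) with h | h <;>
      rcases le_total (pvQ cs k + v) (pvDv cs (k+1) + v) with h2 | h2 <;>
      simp [max_def] <;> omega

-- the dp list after m outer iterations of A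
def pvDp (cs : List Char) (n m : ℕ) : List Int :=
  (List.range n).map (fun j => if j < m then pvDv cs j else 0)

lemma pvDp_zero (cs : List Char) (n : ℕ) : pvDp cs n 0 = List.replicate n 0 := by
  simp [pvDp]

lemma pvDp_length (cs : List Char) (n m : ℕ) : (pvDp cs n m).length = n := by
  simp [pvDp]

lemma pvDp_getD_lt (cs : List Char) (n m j : ℕ) (hj : j < m) (hjn : j < n) :
    (pvDp cs n m).getD j 0 = pvDv cs j := by
  rw [List.getD, pvDp, List.getElem?_map]
  simp [List.getElem?_range hjn, hj]

lemma pvDp_set (cs : List Char) (n m : ℕ) (_hm : m < n) :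
    (pvDp cs n m).set m (pvDv cs m) = pvDp cs n (m+1) := by
  apply List.ext_getElem
  · simp [pvDp]
  · intro j h1 h2
    have hjn : j < n := by simpa [pvDp] using h2
    rw [List.getElem_set]
    by_cases hjm : m = j
    · subst hjm
      simp [pvDp, List.getElem_map, List.getElem_range]
    · simp only [if_neg hjm, pvDp, List.getElem_map, List.getElem_range]
      have : j < m ↔ j < m + 1 := by omega
      simp [this]

-- one outer step of A, from state after m iterations (lambda written zeta-reduced,
-- exactly as it appears in the unfolded port)
lemma outer_step (cs : List Char) (m : ℕ) (hm : m < cs.length) :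
    ((List.foldl (fun dp j =>
         dp.set ((m:Int)).toNat (max (PySem.List.pyGetD dp (m:Int) 0)
           (PySem.List.pyGetD dp j 0 + (((PySem.List.pyGetD cs (m:Int) ' ').toNat : Int) - 97 + 1))))
       ((pvDp cs cs.length m).set ((m:Int)).toNat (((PySem.List.pyGetD cs (m:Int) ' ').toNat : Int) - 97 + 1))
       (PySem.List.pyRange ((m:Int) - 2) (-1) (-1)),
      max (pvPf cs m) (PySem.List.pyGetD
        (List.foldl (fun dp j =>
           dp.set ((m:Int)).toNat (max (PySem.List.pyGetD dp (m:Int) 0)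
             (PySem.List.pyGetD dp j 0 + (((PySem.List.pyGetD cs (m:Int) ' ').toNat : Int) - 97 + 1))))
         ((pvDp cs cs.length m).set ((m:Int)).toNat (((PySem.List.pyGetD cs (m:Int) ' ').toNat : Int) - 97 + 1))
         (PySem.List.pyRange ((m:Int) - 2) (-1) (-1))) (m:Int) 0)) : List Int × Int)
    = (pvDp cs cs.length (m+1), pvPf cs (m+1)) := by
  have hval : ((PySem.List.pyGetD cs (m : Int) ' ').toNat : Int) - 97 + 1 = pvVal cs m := by
    rw [PySem.List.pyGetD_natCast]; rfl
  have htn : ((m:Int)).toNat = m := by simp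
  simp only [hval, htn]
  have hlen : m < ((pvDp cs cs.length m).set m (pvVal cs m)).length := by
    simp [pvDp_length]; exact hm
  by_cases h2 : m < 2
  · -- inner range empty
    have hnil : PySem.List.pyRange ((m:Int) - 2) (-1) (-1) = [] := by
      apply PySem.List.pyRange_neg_one_eq_nil; omega
    rw [hnil]
    simp only [List.foldl_nil]
    have hdv : pvVal cs m = pvDv cs m := by
      interval_cases m <;> simp [pvDv, pvPf]
    have hget : PySem.List.pyGetD ((pvDp cs cs.length m).set m (pvVal cs m)) (m:Int) 0 = pvVal cs m := by
      rw [PySem.List.pyGetD_natCast, List.getD, List.getElem?_set_self, Option.getD_some]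
      simp [pvDp_length]; exact hm
    rw [hget, hdv, pvDp_set cs _ m hm, ← pvPf_succ]
  · -- inner range = m-2 .. 0
    push Not at h2
    have hrange : ((m:Int) - 2) = ((m - 2 : ℕ) : Int) := by omega
    set dp1 := (pvDp cs cs.length m).set m (pvVal cs m) with hdp1
    have hdp1get : ∀ j : ℕ, j ≤ m - 2 → dp1.getD j 0 = pvDv cs j := by
      intro j hj
      rw [hdp1, List.getD, List.getElem?_set_ne (by omega), ← List.getD]
      exact pvDp_getD_lt cs _ m j (by omega) (by omega)
    rw [hrange, inner_fold cs (pvVal cs m) m (m-2) (by omega) dp1 hlen hdp1get]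
    have hd1m : dp1.getD m 0 = pvVal cs m := by
      rw [hdp1, List.getD, List.getElem?_set_self, Option.getD_some]
      simp [pvDp_length]; exact hm
    have hgetm : PySem.List.pyGetD (dp1.set m (max (dp1.getD m 0) (pvQ cs (m-2) + pvVal cs m))) (m:Int) 0
        = max (dp1.getD m 0) (pvQ cs (m-2) + pvVal cs m) := by
      rw [PySem.List.pyGetD_natCast, List.getD, List.getElem?_set_self, Option.getD_some]
      simpa [hdp1, pvDp_length] using hm
    rw [hgetm, hd1m]
    have hDvm : max (pvVal cs m) (pvQ cs (m-2) + pvVal cs m) = pvDv cs m := by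
      have h1 : max (pvVal cs m) (pvQ cs (m-2) + pvVal cs m)
          = pvVal cs m + max 0 (pvQ cs (m-2)) := by
        rcases le_total 0 (pvQ cs (m-2)) with h | h
        · rw [max_eq_right h, max_eq_right (by omega)]; ring
        · rw [max_eq_left h, max_eq_left (by omega)]; ring
      rw [h1, ← pvPf_eq_maxQ]
      have : m - 2 + 1 = m - 1 := by omega
      rw [this, pvDv]
    rw [hDvm, hdp1, List.set_set, pvDp_set cs _ m hm, ← pvPf_succ]

-- A's outer loop invariant (the fold exactly as it appears in the unfolded port)
lemma a_loop (cs : List Char) : ∀ (m : ℕ), m ≤ cs.length →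
    List.foldl (fun (st : List Int × Int) i =>
      (List.foldl (fun dp j =>
           dp.set i.toNat (max (PySem.List.pyGetD dp i 0)
             (PySem.List.pyGetD dp j 0 + (((PySem.List.pyGetD cs i ' ').toNat : Int) - 97 + 1))))
         (st.1.set i.toNat (((PySem.List.pyGetD cs i ' ').toNat : Int) - 97 + 1))
         (PySem.List.pyRange (i - 2) (-1) (-1)),
       max st.2 (PySem.List.pyGetD
         (List.foldl (fun dp j =>
            dp.set i.toNat (max (PySem.List.pyGetD dp i 0)
              (PySem.List.pyGetD dp j 0 + (((PySem.List.pyGetD cs i ' ').toNat : Int) - 97 + 1))))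
          (st.1.set i.toNat (((PySem.List.pyGetD cs i ' ').toNat : Int) - 97 + 1))
          (PySem.List.pyRange (i - 2) (-1) (-1))) i 0)))
      (List.replicate ((cs.length : Int)).toNat 0, 0) (PySem.List.pyRange 0 (m : Int) 1)
    = (pvDp cs cs.length m, pvPf cs m) := by
  intro m
  induction m with
  | zero =>
    rw [show ((0:ℕ):Int) = 0 by norm_num, PySem.List.pyRange_one_eq_nil (le_refl 0)]
    intro _
    simp [pvDp_zero, pvPf]
  | succ m ih =>
    intro hm
    have hcast : ((m+1 : ℕ) : Int) = (m : Int) + 1 := by push_cast; ring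
    rw [hcast, PySem.List.pyRange_one_succ_right (by positivity), List.foldl_append]
    rw [ih (by omega)]
    simp only [List.foldl_cons, List.foldl_nil]
    exact outer_step cs m (by omega)

-- B's loop invariant
lemma b_loop (cs : List Char) : ∀ (m : ℕ),
    List.foldl (fun (st : Int × Int × Int) i =>
      (st.2.1, max st.2.1 (((PySem.List.pyGetD cs i ' ').toNat : Int) - 97 + 1 + st.1),
        max st.2.2 (((PySem.List.pyGetD cs i ' ').toNat : Int) - 97 + 1 + st.1)))
      (0, 0, 0) (PySem.List.pyRange 0 (m : Int) 1)
    = (pvPf cs (m-1), pvPf cs m, pvPf cs m) := by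
  intro m
  induction m with
  | zero =>
    rw [show ((0:ℕ):Int) = 0 by norm_num, PySem.List.pyRange_one_eq_nil (le_refl 0)]
    simp [pvPf]
  | succ m ih =>
    have hcast : ((m+1 : ℕ) : Int) = (m : Int) + 1 := by push_cast; ring
    rw [hcast, PySem.List.pyRange_one_succ_right (by positivity), List.foldl_append, ih]
    simp only [List.foldl_cons, List.foldl_nil]
    have hd : ((PySem.List.pyGetD cs (m : Int) ' ').toNat : Int) - 97 + 1 + pvPf cs (m-1) = pvDv cs m := by
      rw [show ((PySem.List.pyGetD cs (m : Int) ' ').toNat : Int) - 97 + 1 = pvVal cs m from by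
        rw [PySem.List.pyGetD_natCast]; rfl]
      rfl
    simp only [hd]
    rw [(pvPf_succ cs m).symm, show m + 1 - 1 = m from rfl]

-- ===== VERDICT (by name: the statement is the Claim_ definition above) =====
theorem max_loose_subsequence_value_spec : Claim_equal_max_loose_subsequence_value := by
  intro s _
  unfold Spec_max_loose_subsequence_value
  simp only [max_loose_subsequence_value, max_loose_subsequence_value_alt, PySem.Str.len_eq]
  rw [a_loop s.toList s.toList.length (le_refl _), b_loop s.toList s.toList.length]
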